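-- pv_equiv track=rewrite | github.com/aumhaa/m4m8 | Python Scripts Live11/aumhaa/v2/control_surface/components/mono_param.py | generate_strip_string
-- ===== SOURCE A (Python) =====
-- def generate_strip_string(display_string):
-- 	NUM_CHARS_PER_DISPLAY_STRIP = 12
-- 	if (not display_string):
-- 		return (' ' * NUM_CHARS_PER_DISPLAY_STRIP)
-- 	if ((len(display_string.strip()) > (NUM_CHARS_PER_DISPLAY_STRIP - 1)) and (display_string.endswith('dB') and (display_string.find('.') != -1))):
-- 		display_string = display_string[:-2]
-- 	if (len(display_string) > (NUM_CHARS_PER_DISPLAY_STRIP - 1)):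
-- 		for um in [' ',
-- 		 'i',
-- 		 'o',
-- 		 'u',
-- 		 'e',
-- 		 'a']:
-- 			while ((len(display_string) > (NUM_CHARS_PER_DISPLAY_STRIP - 1)) and (display_string.rfind(um, 1) != -1)):
-- 				um_pos = display_string.rfind(um, 1)
-- 				display_string = (display_string[:um_pos] + display_string[(um_pos + 1):])
-- 	else:
-- 		display_string = display_string.center((NUM_CHARS_PER_DISPLAY_STRIP - 1))
-- 	ret = ''
-- 	for i in range((NUM_CHARS_PER_DISPLAY_STRIP - 1)):
-- 		if ((ord(display_string[i]) > 127) or (ord(display_string[i]) < 0)):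
-- 			ret += ' '
-- 		else:
-- 			ret += display_string[i]
--
-- 	ret += ' '
-- 	ret = ret.replace(' ', '_')
-- 	assert (len(ret) == NUM_CHARS_PER_DISPLAY_STRIP)
-- 	return ret
-- ===== SOURCE B (Python) =====
-- def generate_strip_string(display_string):
--     if display_string == '':
--         return ' ' * 12
--     s = display_string
--     if s.endswith('dB') and '.' in s and len(s.strip()) > 11:
--         s = s[:len(s) - 2]
--     if len(s) > 11:
--         for um in ' iouea':
--             if len(s) > 11:
--                 # one pass per vowel: walk the reversed tail (index 0 is protected)
--                 # and skip the first min(count, excess) occurrences of um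
--                 rest = s[:0:-1]
--                 k = min(rest.count(um), len(s) - 11)
--                 kept = []
--                 for ch in rest:
--                     if k and ch == um:
--                         k -= 1
--                     else:
--                         kept.append(ch)
--                 kept.reverse()
--                 s = s[0] + ''.join(kept)
--         body = s
--     else:
--         pad = 11 - len(s)
--         left = (pad + 1) // 2
--         body = ' ' * left + s + ' ' * (pad - left)
--     return ''.join('_' if ch == ' ' or ord(ch) > 127 else ch for ch in body[:11]) + '_'
-- ===== Notes on version B (the rewrite author's own statement) =====
-- stated objective: faster
-- what changed: The per-vowel repeated rfind+slice while-loop (one full scan and one full rebuild per removed character) is replaced by a single counter-limited pass over the reversed tail per vowel; str.center is replaced by an explicit arithmetic padding formula, and the indexed sanitize loop plus the trailing space-to-underscore replace are fused into one map over the first 11 characters.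
import Mathlib
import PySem

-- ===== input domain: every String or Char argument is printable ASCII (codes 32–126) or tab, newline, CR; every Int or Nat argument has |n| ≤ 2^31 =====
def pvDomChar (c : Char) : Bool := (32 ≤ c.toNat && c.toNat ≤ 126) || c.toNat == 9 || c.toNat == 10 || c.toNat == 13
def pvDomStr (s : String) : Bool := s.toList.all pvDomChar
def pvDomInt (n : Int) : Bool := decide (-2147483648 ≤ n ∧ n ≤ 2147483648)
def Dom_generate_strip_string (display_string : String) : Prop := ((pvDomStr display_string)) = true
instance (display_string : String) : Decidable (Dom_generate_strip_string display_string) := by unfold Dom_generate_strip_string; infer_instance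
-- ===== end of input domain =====

-- B replaces A's per-vowel repeated rfind+slice while-loop by one counter-limited pass over the
-- reversed tail, pads by an explicit arithmetic formula instead of str.center, and fuses the
-- sanitize loop and the trailing replace into a single map; same return value.

-- ===== PORT A =====

-- str.center(width): hand port (PySem has no center), exact to CPython, which pads
-- left = marg//2 + (marg & width & 1) (the & expression is written arithmetically here)
def pvCenterA (s : List Char) (w : Nat) : List Char :=
  if w ≤ s.length then s
  else
    let marg := w - s.length
    let left := marg / 2 + (if marg % 2 = 1 ∧ w % 2 = 1 then 1 else 0)
    List.replicate left ' ' ++ s ++ List.replicate (marg - left) ' '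

-- A's inner while-loop for one character um; fuel makes it total (called with fuel = length:
-- every pass removes exactly one character, so at most length iterations can happen)
def pvAWhile (um : Char) : Nat → List Char → List Char
  | 0, s => s
  | fuel + 1, s =>
    if 11 < s.length ∧ PySem.Chars.rfindFrom s [um] 1 none ≠ -1 then
      pvAWhile um fuel
        (PySem.List.slice s none (some (PySem.Chars.rfindFrom s [um] 1 none)) ++
         PySem.List.slice s (some (PySem.Chars.rfindFrom s [um] 1 none + 1)) none)
    else s

def generate_strip_string (display_string : String) : String :=
  let s0 := display_string.toList
  if s0 = [] then String.ofList (List.replicate 12 ' ')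
  else
    let s1 := if 11 < (PySem.Chars.strip s0).length ∧ PySem.Chars.endswith s0 ['d', 'B'] = true ∧ PySem.Chars.find s0 ['.'] ≠ -1
              then PySem.List.slice s0 none (some (-2)) else s0
    let s2 := if 12 - 1 < s1.length then
        [' ', 'i', 'o', 'u', 'e', 'a'].foldl (fun t um => pvAWhile um t.length t) s1
      else pvCenterA s1 11
    -- ret loop over range(11); s2[i] is always in range (len(s2) ≥ 11 on every path), so pyGetD is exact
    let ret := (PySem.List.pyRange 0 11 1).foldl
      (fun acc i =>
        if 127 < (PySem.List.pyGetD s2 i ' ').toNat ∨ (PySem.List.pyGetD s2 i ' ').toNat < 0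
        then acc ++ [' '] else acc ++ [PySem.List.pyGetD s2 i ' ']) []
    -- the assert always holds (ret has 12 chars by construction), so it is not ported
    String.ofList (PySem.Chars.replace (ret ++ [' ']) [' '] ['_'])

-- ===== PORT B =====

-- Source B's kept/k loop: copy the list, skipping the first k occurrences of um
def pvDropCount (um : Char) : Nat → List Char → List Char
  | _, [] => []
  | k, ch :: rest =>
    if 0 < k ∧ ch = um then pvDropCount um (k - 1) rest
    else ch :: pvDropCount um k rest

-- Source B's fused output map: '_' if ch == ' ' or ord(ch) > 127 else ch
def pvSanitize (ch : Char) : Char := if ch = ' ' ∨ 127 < ch.toNat then '_' else ch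

def generate_strip_string_alt (display_string : String) : String :=
  if display_string.toList = [] then String.ofList (List.replicate 12 ' ')  -- display_string == ''
  else
    let s0 := display_string.toList
    let s := if PySem.Chars.endswith s0 ['d', 'B'] = true ∧ PySem.Chars.isIn ['.'] s0 = true ∧ 11 < (PySem.Chars.strip s0).length
             then s0.take (s0.length - 2) else s0  -- s[:len(s)-2] (len ≥ 12 under the guard)
    let body :=
      if 11 < s.length then
        [' ', 'i', 'o', 'u', 'e', 'a'].foldl (fun t um =>
          if 11 < t.length then
            -- rest = s[:0:-1] is the tail reversed; s[0] = headD (t ≠ [] since len > 11)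
            let rest := t.tail.reverse
            let k := min (rest.count um) (t.length - 11)
            t.headD ' ' :: (pvDropCount um k rest).reverse
          else t) s
      else
        let pad := 11 - s.length
        let left := (pad + 1) / 2  -- = CPython's marg//2 + (marg & 11 & 1) since the width 11 is odd
        List.replicate left ' ' ++ s ++ List.replicate (pad - left) ' '
    String.ofList ((body.take 11).map pvSanitize ++ ['_'])

-- ===== PRECONDITION & SPEC =====
def Spec_generate_strip_string (display_string : String) (out : String) : Prop := out = generate_strip_string_alt display_string
instance (display_string : String) (out : String) : Decidable (Spec_generate_strip_string display_string out) := by unfold Spec_generate_strip_string; infer_instance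

-- ===== CLAIM (what is proved, stated in full; the proofs are below) =====
def Claim_equal_generate_strip_string : Prop := ∀ (display_string : String), Dom_generate_strip_string display_string → Spec_generate_strip_string display_string (generate_strip_string display_string)

-- ===== LEMMAS AND PROOFS =====

theorem pv_mem_of_head? {a : Char} {l : List Char} (h : l.head? = some a) : a ∈ l := by
  cases l <;> simp_all

theorem pv_prefix_single {um : Char} {l : List Char} :
    [um].isPrefixOf l = true ↔ l.head? = some um := by
  cases l with
  | nil => simp [List.isPrefixOf]
  | cons a t =>
    simp [List.isPrefixOf]
    exact eq_comm

theorem pv_go_of_not_mem {um : Char} {s : List Char} (h : um ∉ s) :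
    ∀ j, PySem.Chars.rfind.go s [um] j = -1 := by
  intro j
  induction j with
  | zero =>
    simp only [PySem.Chars.rfind.go]
    rw [if_neg]
    intro hp
    exact h (pv_mem_of_head? (pv_prefix_single.1 hp))
  | succ j ih =>
    simp only [PySem.Chars.rfind.go]
    rw [if_neg, ih]
    intro hp
    exact h (List.mem_of_mem_drop (pv_mem_of_head? (pv_prefix_single.1 hp)))

theorem pv_go_last {um : Char} {v u : List Char} (hu : um ∉ u) :
    ∀ j, v.length ≤ j → PySem.Chars.rfind.go (v ++ um :: u) [um] j = v.length := by
  intro j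
  induction j with
  | zero =>
    intro hj
    have hv : v = [] := List.eq_nil_of_length_eq_zero (Nat.le_zero.1 hj)
    subst hv
    simp [PySem.Chars.rfind.go, List.isPrefixOf]
  | succ j ih =>
    intro hj
    rcases Nat.eq_or_lt_of_le hj with he | hlt
    · simp only [PySem.Chars.rfind.go]
      rw [if_pos, ← he]
      rw [← he, List.drop_left]
      simp [List.isPrefixOf]
    · have hvj : v.length ≤ j := by omega
      simp only [PySem.Chars.rfind.go]
      rw [if_neg, ih hvj]
      intro hp
      have hh := pv_prefix_single.1 hp
      have hdrop : (v ++ um :: u).drop (j + 1) = u.drop (j - v.length) := by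
        rw [List.drop_append]
        have e1 : List.drop (j + 1) v = [] := by
          apply List.drop_eq_nil_of_le; omega
        have e2 : j + 1 - v.length = (j - v.length) + 1 := by omega
        rw [e1, e2, List.nil_append, List.drop_succ_cons]
      rw [hdrop] at hh
      exact hu (List.mem_of_mem_drop (pv_mem_of_head? hh))

theorem pv_exists_last {um : Char} {t : List Char} (h : um ∈ t) :
    ∃ v u, t = v ++ um :: u ∧ um ∉ u := by
  induction t with
  | nil => simp at h
  | cons a t ih =>
    by_cases hm : um ∈ t
    · rcases ih hm with ⟨v, u, rfl, hu⟩
      exact ⟨a :: v, u, rfl, hu⟩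
    · have ha : a = um := by
        rcases List.mem_cons.1 h with h' | h'
        · exact h'.symm
        · exact absurd h' hm
      exact ⟨[], t, by simp [ha], hm⟩

theorem pv_rfindFrom_eq (um d : Char) (t : List Char) :
    PySem.Chars.rfindFrom (d :: t) [um] 1 none =
      (if PySem.Chars.rfind t [um] = -1 then -1 else 1 + PySem.Chars.rfind t [um]) := by
  unfold PySem.Chars.rfindFrom
  simp only [if_neg (by norm_num : ¬ (1:Int) < 0)]
  rw [if_neg (by simp : ¬ (((d :: t).length : Int)) < 1)]
  have htake : List.take (((d :: t).length : Int)).toNat (d :: t) = d :: t := by simp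
  rw [htake]
  norm_num [PySem.Chars.rfind]

theorem pv_rfindFrom_of_not_mem {um d : Char} {t : List Char} (h : um ∉ t) :
    PySem.Chars.rfindFrom (d :: t) [um] 1 none = -1 := by
  rw [pv_rfindFrom_eq, if_pos]
  exact pv_go_of_not_mem h _

theorem pv_rfindFrom_last {um d : Char} {v u : List Char} (hu : um ∉ u) :
    PySem.Chars.rfindFrom (d :: (v ++ um :: u)) [um] 1 none = 1 + (v.length : Int) := by
  rw [pv_rfindFrom_eq]
  have hg : PySem.Chars.rfind (v ++ um :: u) [um] = (v.length : Int) := by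
    unfold PySem.Chars.rfind
    exact pv_go_last hu _ (by simp)
  rw [hg, if_neg (by omega)]

theorem pv_splice_last (um d : Char) (v u : List Char) :
    PySem.List.slice (d :: (v ++ um :: u)) none (some (1 + (v.length : Int))) ++
      PySem.List.slice (d :: (v ++ um :: u)) (some (1 + (v.length : Int) + 1)) none =
      d :: (v ++ u) := by
  have h1 : (1 + (v.length : Int)) = ((v.length + 1 : Nat) : Int) := by push_cast; ring
  have h2 : (1 + (v.length : Int) + 1) = ((v.length + 2 : Nat) : Int) := by push_cast; ring
  rw [h2, h1, PySem.List.slice_to_natCast, PySem.List.slice_from_natCast]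
  have ht : List.take (v.length + 1) (d :: (v ++ um :: u)) = d :: v := by
    rw [List.take_succ_cons]
    congr 1
    rw [List.take_append_of_le_length (le_refl _), List.take_length]
  have hd : List.drop (v.length + 2) (d :: (v ++ um :: u)) = u := by
    have e : v.length + 2 = (v.length + 1) + 1 := by ring
    rw [e, List.drop_succ_cons, List.drop_append]
    simp
  rw [ht, hd]
  simp

theorem pvDropCount_zero (um : Char) (l : List Char) : pvDropCount um 0 l = l := by
  induction l with
  | nil => rfl
  | cons a t ih => simp [pvDropCount, ih]

theorem pvDropCount_succ {um : Char} {l : List Char} (h : um ∈ l) (k : Nat) :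
    pvDropCount um (k + 1) l = pvDropCount um k (l.erase um) := by
  induction l with
  | nil => simp at h
  | cons a t ih =>
    by_cases ha : a = um
    · subst ha
      simp [pvDropCount, List.erase_cons_head]
    · have hm : um ∈ t := by
        rcases List.mem_cons.1 h with h' | h'
        · exact absurd h'.symm ha
        · exact h'
      rw [List.erase_cons_tail (by simp [ha])]
      simp only [pvDropCount, if_neg (by simp [ha] : ¬(0 < k + 1 ∧ a = um)),
        if_neg (by simp [ha] : ¬(0 < k ∧ a = um))]
      rw [ih hm]

theorem pvDropCount_length_ge (um : Char) : ∀ (k : Nat) (l : List Char),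
    l.length - k ≤ (pvDropCount um k l).length := by
  intro k l
  induction l generalizing k with
  | nil => simp [pvDropCount]
  | cons a t ih =>
    by_cases h : 0 < k ∧ a = um
    · simp only [pvDropCount, if_pos h]
      have := ih (k - 1)
      simp only [List.length_cons]
      omega
    · simp only [pvDropCount, if_neg h, List.length_cons]
      have := ih k
      omega

-- B's per-um step (definitionally the foldl body of the alt port)
def pvBStep (t : List Char) (um : Char) : List Char :=
  if 11 < t.length then
    let rest := t.tail.reverse
    let k := min (rest.count um) (t.length - 11)
    t.headD ' ' :: (pvDropCount um k rest).reverse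
  else t

theorem pv_erase_rev {um : Char} {v u : List Char} (hu : um ∉ u) :
    (v ++ um :: u).reverse.erase um = (v ++ u).reverse := by
  have hrw : (v ++ um :: u).reverse = u.reverse ++ um :: v.reverse := by simp
  rw [hrw, List.erase_append_right _ (by simpa using hu), List.erase_cons_head]
  simp

-- the per-um equivalence: A's while loop computes B's one-pass result
theorem pv_while_eq (um : Char) : ∀ (fuel : Nat) (s : List Char), s.length ≤ 11 + fuel →
    pvAWhile um fuel s = pvBStep s um := by
  intro fuel
  induction fuel with
  | zero =>
    intro s h
    have h11 : ¬ 11 < s.length := by omega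
    simp [pvAWhile, pvBStep, h11]
  | succ fuel ih =>
    intro s h
    by_cases h11 : 11 < s.length
    · cases s with
      | nil => simp at h11
      | cons d t =>
        by_cases hm : um ∈ t
        · obtain ⟨v, u, rfl, hu⟩ := pv_exists_last hm
          have hr := pv_rfindFrom_last (d := d) (v := v) hu
          have hlen : (d :: (v ++ um :: u)).length = v.length + u.length + 2 := by simp; omega
          simp only [pvAWhile, hr]
          rw [if_pos ⟨h11, by omega⟩, pv_splice_last]
          rw [ih _ (by simp only [List.length_cons, List.length_append] at h ⊢; omega)]
          -- now: pvBStep (d :: (v ++ u)) um = pvBStep (d :: (v ++ um :: u)) um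
          have hcount : (v ++ um :: u).reverse.count um = (v ++ u).reverse.count um + 1 := by
            simp [List.count_append]
            omega
          have hmemr : um ∈ (v ++ um :: u).reverse := by simp
          simp only [pvBStep, List.tail_cons, List.headD_cons, List.length_cons]
          have h11' : 10 ≤ v.length + u.length := by
            simp only [List.length_cons, List.length_append] at h11
            omega
          have hlv : (v ++ um :: u).length = (v ++ u).length + 1 := by
            simp only [List.length_append, List.length_cons]
            omega
          by_cases h10 : 11 < (v ++ u).length + 1
          · rw [if_pos h10, if_pos (by rw [hlv]; omega)]
            have hmin : min ((v ++ um :: u).reverse.count um) ((v ++ um :: u).length + 1 - 11)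
                = (min ((v ++ u).reverse.count um) ((v ++ u).length + 1 - 11)) + 1 := by
              rw [hcount, hlv]
              omega
            rw [hmin, pvDropCount_succ hmemr, pv_erase_rev hu]
          · rw [if_neg h10, if_pos (by rw [hlv]; simp only [List.length_append] at h10 ⊢; omega)]
            have hl10 : (v ++ u).length = 10 := by
              simp only [List.length_append] at h10 ⊢
              omega
            have hmin : min ((v ++ um :: u).reverse.count um) ((v ++ um :: u).length + 1 - 11) = 1 := by
              rw [hcount, hlv, hl10]
              omega
            rw [hmin, show (1:Nat) = 0 + 1 from rfl, pvDropCount_succ hmemr, pv_erase_rev hu,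
              pvDropCount_zero, List.reverse_reverse]
        · have hr := pv_rfindFrom_of_not_mem (d := d) hm
          simp only [pvAWhile, hr]
          rw [if_neg (by simp)]
          have hc : (t.reverse.count um) = 0 := by
            simp [List.count_eq_zero]
            exact hm
          simp only [pvBStep, List.tail_cons, List.headD_cons, hc]
          rw [if_pos h11]
          simp [pvDropCount_zero]
    · cases fuel with
      | zero => simp [pvAWhile, pvBStep, h11]
      | succ f =>
        simp only [pvAWhile]
        rw [if_neg (by intro hc; exact h11 hc.1)]
        simp [pvBStep, h11]

theorem pvBStep_len {t : List Char} (h : 11 ≤ t.length) (um : Char) :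
    11 ≤ (pvBStep t um).length := by
  unfold pvBStep
  split
  · rename_i h11
    simp only [List.length_cons, List.length_reverse]
    have hdc := pvDropCount_length_ge um
      (min (t.tail.reverse.count um) (t.length - 11)) t.tail.reverse
    simp only [List.length_reverse, List.length_tail] at hdc
    omega
  · exact h

theorem pv_foldl_len : ∀ (cs : List Char) (s : List Char), 11 ≤ s.length →
    11 ≤ (cs.foldl pvBStep s).length := by
  intro cs
  induction cs with
  | nil => intro s h; exact h
  | cons c cs ih => intro s h; exact ih _ (pvBStep_len h c)

theorem pvCenterA_len (l : List Char) : 11 ≤ (pvCenterA l 11).length := by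
  by_cases h : 11 ≤ l.length
  · simp [pvCenterA, h]
  · simp only [pvCenterA, if_neg h, List.length_append, List.length_replicate]
    split_ifs <;> omega

-- B's arithmetic padding equals A's str.center port (width 11 is odd)
theorem pv_pad_eq_center {s : List Char} (h : ¬ 11 < s.length) :
    List.replicate ((11 - s.length + 1) / 2) ' ' ++ s ++
      List.replicate (11 - s.length - (11 - s.length + 1) / 2) ' ' = pvCenterA s 11 := by
  by_cases he : 11 ≤ s.length
  · have h11 : s.length = 11 := by omega
    simp [pvCenterA, h11]
  · simp only [pvCenterA, if_neg he]
    have hleft : (11 - s.length + 1) / 2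
        = (11 - s.length) / 2 + (if (11 - s.length) % 2 = 1 ∧ 11 % 2 = 1 then 1 else 0) := by
      split_ifs with hp
      · omega
      · simp only [Nat.reduceMod, and_true] at hp
        omega
    rw [hleft]
    norm_num

theorem pv_final_aux (l : List Char) :
    ∀ (n : Nat) (acc : List Char), n ≤ l.length →
    (List.range n).foldl
      (fun acc (i : Nat) =>
        if 127 < (PySem.List.pyGetD l (i : Int) ' ').toNat ∨ (PySem.List.pyGetD l (i : Int) ' ').toNat < 0
        then acc ++ [' '] else acc ++ [PySem.List.pyGetD l (i : Int) ' ']) acc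
    = acc ++ (l.take n).map (fun ch => if 127 < ch.toNat then ' ' else ch) := by
  intro n
  induction n with
  | zero => intro acc _; simp
  | succ n ih =>
    intro acc hn
    rw [List.range_succ, List.foldl_append, ih acc (by omega)]
    have hlt : n < l.length := by omega
    simp only [List.foldl_cons, List.foldl_nil]
    rw [PySem.List.pyGetD_natCast, List.getD_eq_getElem l ' ' hlt]
    have htake : List.take (n + 1) l = List.take n l ++ [l[n]] := by
      rw [List.take_add_one, List.getElem?_eq_getElem hlt]
      simp
    rw [htake, List.map_append, ← List.append_assoc]
    by_cases hch : 127 < l[n].toNat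
    · rw [if_pos (Or.inl hch)]
      simp [hch]
    · rw [if_neg (by simp [hch])]
      simp [hch]

theorem pv_final_eq {l : List Char} (h : 11 ≤ l.length) :
    (PySem.List.pyRange 0 11 1).foldl
      (fun acc i =>
        if 127 < (PySem.List.pyGetD l i ' ').toNat ∨ (PySem.List.pyGetD l i ' ').toNat < 0
        then acc ++ [' '] else acc ++ [PySem.List.pyGetD l i ' ']) [] =
    (l.take 11).map (fun ch => if 127 < ch.toNat then ' ' else ch) := by
  have e11 : (11 : Int) = ((11 : Nat) : Int) := by norm_num
  rw [e11, PySem.List.pyRange_zero_natCast, List.foldl_map]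
  exact pv_final_aux l 11 [] h

-- str.replace(' ', '_') on single characters is a map (go generalised over the accumulator)
theorem pv_replace_go (n : Nat) : ∀ (l acc : List Char), l.length ≤ n →
    PySem.Chars.replace.go [' '] ['_'] n l acc
      = acc.reverse ++ l.map (fun c => if c = ' ' then '_' else c) := by
  induction n with
  | zero =>
    intro l acc h
    have : l = [] := List.eq_nil_of_length_eq_zero (Nat.le_zero.1 h)
    subst this
    simp [PySem.Chars.replace.go]
  | succ n ih =>
    intro l acc h
    cases l with
    | nil => simp [PySem.Chars.replace.go]
    | cons a t =>
      simp only [List.length_cons, Nat.add_le_add_iff_right] at h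
      by_cases ha : a = ' '
      · subst ha
        simp only [PySem.Chars.replace.go, List.isPrefixOf, BEq.rfl, Bool.and_true, if_pos]
        rw [show List.drop [' '].length (' ' :: t) = t from rfl, ih _ _ h]
        simp
      · have hp : [' '].isPrefixOf (a :: t) = false := by
          simp [List.isPrefixOf]
          exact fun he => absurd he.symm ha
        simp only [PySem.Chars.replace.go, hp, Bool.false_eq_true, if_false]
        rw [ih _ _ h]
        simp [ha]

theorem pv_replace_map (l : List Char) :
    PySem.Chars.replace l [' '] ['_'] = l.map (fun c => if c = ' ' then '_' else c) := by
  unfold PySem.Chars.replace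
  rw [if_neg (by simp)]
  exact pv_replace_go l.length l [] le_rfl

-- A's sanitize-then-replace pipeline equals B's fused map, on any body of length ≥ 11
theorem pv_output_eq {body : List Char} (h : 11 ≤ body.length) :
    PySem.Chars.replace
      ((PySem.List.pyRange 0 11 1).foldl
        (fun acc i =>
          if 127 < (PySem.List.pyGetD body i ' ').toNat ∨ (PySem.List.pyGetD body i ' ').toNat < 0
          then acc ++ [' '] else acc ++ [PySem.List.pyGetD body i ' ']) [] ++ [' '])
      [' '] ['_']
    = (body.take 11).map pvSanitize ++ ['_'] := by
  rw [pv_final_eq h, pv_replace_map, List.map_append, List.map_map]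
  congr 1
  apply List.map_congr_left
  intro c _
  simp only [Function.comp_apply, pvSanitize]
  by_cases h127 : 127 < c.toNat
  · simp [h127]
  · by_cases hsp : c = ' ' <;> simp [h127, hsp]

-- ===== VERDICT (by name: the statement is the Claim_ definition above) =====
theorem generate_strip_string_spec : Claim_equal_generate_strip_string := by
  intro ds _
  unfold Spec_generate_strip_string
  simp only [generate_strip_string, generate_strip_string_alt]
  by_cases h0 : ds.toList = []
  · simp [h0]
  · rw [if_neg h0, if_neg h0]
    have hguard : (if 11 < (PySem.Chars.strip ds.toList).length ∧ PySem.Chars.endswith ds.toList ['d', 'B'] = true ∧ PySem.Chars.find ds.toList ['.'] ≠ -1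
          then PySem.List.slice ds.toList none (some (-2)) else ds.toList)
        = (if PySem.Chars.endswith ds.toList ['d', 'B'] = true ∧ PySem.Chars.isIn ['.'] ds.toList = true ∧ 11 < (PySem.Chars.strip ds.toList).length
          then ds.toList.take (ds.toList.length - 2) else ds.toList) := by
      rw [PySem.List.slice_to_neg_ofNat ds.toList 2 (by omega)]
      by_cases hg : 11 < (PySem.Chars.strip ds.toList).length ∧ PySem.Chars.endswith ds.toList ['d', 'B'] = true ∧ PySem.Chars.find ds.toList ['.'] ≠ -1
      · rw [if_pos hg, if_pos ⟨hg.2.1,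
          (PySem.Chars.isIn_iff_infix _ _).2 ((PySem.Chars.find_ne_neg_one_iff _ _).1 hg.2.2), hg.1⟩]
      · rw [if_neg hg, if_neg]
        intro hb
        exact hg ⟨hb.2.2, hb.1,
          (PySem.Chars.find_ne_neg_one_iff _ _).2 ((PySem.Chars.isIn_iff_infix _ _).1 hb.2.1)⟩
    rw [hguard]
    set s1 := (if PySem.Chars.endswith ds.toList ['d', 'B'] = true ∧ PySem.Chars.isIn ['.'] ds.toList = true ∧ 11 < (PySem.Chars.strip ds.toList).length
          then ds.toList.take (ds.toList.length - 2) else ds.toList) with hs1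
    have hstepA : (fun (t : List Char) (um : Char) => pvAWhile um t.length t) = pvBStep := by
      funext t um
      exact pv_while_eq um t.length t (by omega)
    have hstepB : (fun (t : List Char) (um : Char) =>
        if 11 < t.length then
          let rest := t.tail.reverse
          let k := min (rest.count um) (t.length - 11)
          t.headD ' ' :: (pvDropCount um k rest).reverse
        else t) = pvBStep := rfl
    by_cases h11 : 12 - 1 < s1.length
    · rw [if_pos h11, if_pos (by omega : 11 < s1.length), hstepA, hstepB]
      have hlen : 11 ≤ ([' ', 'i', 'o', 'u', 'e', 'a'].foldl pvBStep s1).length :=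
        pv_foldl_len _ _ (by omega)
      rw [congrArg String.ofList (pv_output_eq hlen)]
    · rw [if_neg h11, if_neg (by omega : ¬ 11 < s1.length),
        pv_pad_eq_center (by omega)]
      rw [congrArg String.ofList (pv_output_eq (pvCenterA_len s1))]
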